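-- pv_equiv track=rewrite | github.com/Hgtb/lightbt | data_downloader.py | split_time_intervals
-- ===== SOURCE A (Python) =====
-- from typing import List, Tuple, Union
--
-- def split_time_intervals(start_time: int, end_time: int, interval_size: int, chunk_size: int) -> List[Tuple[int, int]]:
--     """
--     Splits a large time interval into smaller intervals.
--     :param start_time: The start time of the interval.
--     :param end_time: The end time of the interval.
--     :param interval_size: The size of each interval in seconds.
--     :param chunk_size: The number of intervals between start_time and end_time
--     :return: A list of tuples, where each tuple represents a smaller time interval.
--     """
--     intervals = []
--     current_start = start_time
--     while current_start < end_time: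
--         current_end = min(current_start + interval_size * chunk_size, end_time)
--         intervals.append((current_start, current_end))
--         current_start = current_end
--     return intervals
-- ===== SOURCE B (Python) =====
-- from typing import List, Tuple, Union
--
-- def split_time_intervals(start_time: int, end_time: int, interval_size: int, chunk_size: int) -> List[Tuple[int, int]]:
--     if start_time >= end_time:
--         return []
--     step = interval_size * chunk_size
--     # closed-form chunk count: ceil((end_time - start_time) / step)
--     n = -((start_time - end_time) // step)
--     # boundary list, then pair adjacent boundaries
--     bounds = [start_time + i * step for i in range(n)] + [end_time]
--     return list(zip(bounds, bounds[1:]))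
-- ===== Notes on version B (the rewrite author's own statement) =====
-- stated objective: alternative
-- what changed: Instead of a state-carrying while loop with min-clamping, B computes the chunk count in closed form by ceiling division, materialises the boundary list [start + i*step for i in range(n)] + [end_time], and pairs adjacent boundaries with zip; no running state and no clamping min.
import Mathlib
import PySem

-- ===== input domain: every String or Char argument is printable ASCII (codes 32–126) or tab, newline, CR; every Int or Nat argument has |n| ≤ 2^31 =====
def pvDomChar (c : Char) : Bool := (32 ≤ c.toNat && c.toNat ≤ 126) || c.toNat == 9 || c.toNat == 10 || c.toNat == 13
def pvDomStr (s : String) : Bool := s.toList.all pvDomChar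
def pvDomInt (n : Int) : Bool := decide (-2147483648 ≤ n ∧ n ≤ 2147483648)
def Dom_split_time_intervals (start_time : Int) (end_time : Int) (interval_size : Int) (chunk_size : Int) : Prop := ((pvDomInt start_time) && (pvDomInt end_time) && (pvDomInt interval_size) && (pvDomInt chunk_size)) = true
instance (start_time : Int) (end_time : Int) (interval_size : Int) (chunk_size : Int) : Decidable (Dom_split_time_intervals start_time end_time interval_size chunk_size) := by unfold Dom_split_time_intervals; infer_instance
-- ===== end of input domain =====

-- B replaces A's state-carrying while loop (min-clamped running cursor) by a closed-form
-- ceiling-division chunk count, an explicit boundary list, and pairing of adjacent boundaries;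
-- equivalence is claimed on Pre_, outside of which the Python A never returns (it loops forever).

-- ===== PORT A =====
-- A's while loop as fuel-indexed recursion; each iteration advances current_start by at least 1
-- when the step is positive, so fuel (end_time - start_time).toNat is exactly enough on Pre_.
def pvLoopA (fuel : Nat) (cur : Int) (e : Int) (step : Int) : List (Int × Int) :=
  match fuel with
  | 0 => []
  | f + 1 =>
    if cur < e then
      let ce := min (cur + step) e
      (cur, ce) :: pvLoopA f ce e step
    else []

def split_time_intervals (start_time : Int) (end_time : Int) (interval_size : Int) (chunk_size : Int) : List (Int × Int) :=
  pvLoopA (end_time - start_time).toNat start_time end_time (interval_size * chunk_size)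

-- ===== PORT B =====
def split_time_intervals_alt (start_time : Int) (end_time : Int) (interval_size : Int) (chunk_size : Int) : List (Int × Int) :=
  if start_time ≥ end_time then []
  else
    let step := interval_size * chunk_size
    let n := -(PySem.Int.floordiv (start_time - end_time) step)
    let bounds := ((List.range n.toNat).map (fun (i : Nat) => start_time + (i : Int) * step)) ++ [end_time]
    bounds.zip bounds.tail

-- ===== PRECONDITION & SPEC =====
-- Pre_ excludes exactly the inputs on which Python A diverges (start_time < end_time with a
-- non-positive step interval_size * chunk_size): A never returns there.
def Pre_split_time_intervals (start_time : Int) (end_time : Int) (interval_size : Int) (chunk_size : Int) : Prop :=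
  end_time ≤ start_time ∨ 0 < interval_size * chunk_size
instance (start_time : Int) (end_time : Int) (interval_size : Int) (chunk_size : Int) : Decidable (Pre_split_time_intervals start_time end_time interval_size chunk_size) := by unfold Pre_split_time_intervals; infer_instance

def pvWitness_split_time_intervals : Int × Int × Int × Int := (0, 10, 3, 1)

def Spec_split_time_intervals (start_time : Int) (end_time : Int) (interval_size : Int) (chunk_size : Int) (out : List (Int × Int)) : Prop := out = split_time_intervals_alt start_time end_time interval_size chunk_size
instance (start_time : Int) (end_time : Int) (interval_size : Int) (chunk_size : Int) (out : List (Int × Int)) : Decidable (Spec_split_time_intervals start_time end_time interval_size chunk_size out) := by unfold Spec_split_time_intervals; infer_instance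

-- ===== CLAIM =====
def Claim_equal_split_time_intervals : Prop := ∀ (start_time : Int) (end_time : Int) (interval_size : Int) (chunk_size : Int), Dom_split_time_intervals start_time end_time interval_size chunk_size → Pre_split_time_intervals start_time end_time interval_size chunk_size → Spec_split_time_intervals start_time end_time interval_size chunk_size (split_time_intervals start_time end_time interval_size chunk_size)

-- ===== LEMMAS AND PROOFS =====

-- B's boundary list, named for the proofs.
def pvBounds (n : Nat) (st step e : Int) : List Int :=
  ((List.range n).map (fun (i : Nat) => st + (i : Int) * step)) ++ [e]

theorem pvBounds_succ (n : Nat) (st step e : Int) :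
    pvBounds (n + 1) st step e = st :: pvBounds n (st + step) step e := by
  unfold pvBounds
  rw [List.range_succ_eq_map]
  simp only [List.map_cons, List.map_map, Int.natCast_zero, zero_mul, add_zero, List.cons_append]
  refine congrArg _ (congrArg (· ++ [e]) (List.map_congr_left fun k _ => ?_))
  simp only [Function.comp]
  push_cast
  ring

theorem pvZipAdj_cons (a b : Int) (l : List Int) :
    ((a :: b :: l).zip (a :: b :: l).tail) = (a, b) :: ((b :: l).zip (b :: l).tail) := rfl

theorem pvLoopA_nil (fuel : Nat) (cur e step : Int) (h : e ≤ cur) :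
    pvLoopA fuel cur e step = [] := by
  cases fuel with
  | zero => rfl
  | succ f => simp [pvLoopA, not_lt.mpr h]

-- Core: A's loop equals adjacent pairs of the boundary list, for the right n.
theorem pvLoopA_eq_pairs (e step : Int) (hs : 0 < step) :
    ∀ (n : Nat) (cur : Int) (fuel : Nat), (e - cur).toNat ≤ fuel → cur < e →
      e ≤ cur + (n : Int) * step → cur + ((n : Int) - 1) * step < e →
      pvLoopA fuel cur e step
        = (pvBounds n cur step e).zip (pvBounds n cur step e).tail := by
  intro n
  induction n with
  | zero => intro cur fuel _ hlt hub _; exfalso; omega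
  | succ k ih =>
    intro cur fuel hfuel hlt hub hlb
    obtain ⟨f, rfl⟩ : ∃ f, fuel = f + 1 := ⟨fuel - 1, by omega⟩
    rw [pvBounds_succ]
    cases k with
    | zero =>
      -- last interval: e ≤ cur + step, so min clamps to e and the loop stops
      have hmin : min (cur + step) e = e := min_eq_right (by push_cast at hub; omega)
      simp only [pvLoopA, if_pos hlt, hmin, pvBounds]
      rw [pvLoopA_nil _ _ _ _ le_rfl]
      rfl
    | succ m =>
      -- cur + step < e: one more full step
      have hnext : cur + step < e := by
        have : (0 : Int) ≤ (m : Int) * step := mul_nonneg (by positivity) hs.le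
        push_cast at hlb; nlinarith
      have hmin : min (cur + step) e = cur + step := min_eq_left hnext.le
      simp only [pvLoopA, if_pos hlt, hmin]
      rw [pvBounds_succ, pvZipAdj_cons, ← pvBounds_succ]
      refine congrArg _ ?_
      exact ih (cur + step) f (by omega) hnext
        (by push_cast at hub ⊢; linarith)
        (by push_cast at hlb ⊢; linarith)

-- ===== VERDICT =====
theorem split_time_intervals_spec : Claim_equal_split_time_intervals := by
  intro st e i c _ hpre
  unfold Spec_split_time_intervals split_time_intervals split_time_intervals_alt
  by_cases hse : st ≥ e
  · rw [if_pos hse, pvLoopA_nil _ _ _ _ hse]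
  · have hlt : st < e := lt_of_not_ge hse
    have hs : 0 < i * c := by
      rcases hpre with h | h
      · exact absurd hlt (by omega)
      · exact h
    rw [if_neg hse]
    set q : Int := -(PySem.Int.floordiv (st - e) (i * c)) with hq
    have hceil : (q - 1) * (i * c) < e - st ∧ e - st ≤ q * (i * c) := by
      have := (PySem.Int.neg_floordiv_neg_eq_iff_of_pos (a := e - st) (b := i * c) (q := q) hs).mp
      apply this
      rw [hq]
      norm_num
    have hq1 : 1 ≤ q := by
      by_contra h
      have hq0 : q ≤ 0 := by omega
      have : q * (i * c) ≤ 0 := mul_nonpos_of_nonpos_of_nonneg hq0 hs.le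
      omega
    have hqn : ((q.toNat : Int)) = q := Int.toNat_of_nonneg (by omega)
    exact pvLoopA_eq_pairs e (i * c) hs q.toNat st (e - st).toNat le_rfl hlt
      (by rw [hqn]; linarith [hceil.2]) (by rw [hqn]; linarith [hceil.1])
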